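-- pv_equiv track=rewrite | github.com/GinToFim/coding-test | 프로그래머스/unrated/120834. 외계행성의 나이/외계행성의 나이.py | solution
-- ===== SOURCE A (Python) =====
-- def solution(age):
--     age_dict = {0:'a', 1:'b', 2:'c', 3:'d', 4:'e',
--                 5:'f', 6:'g', 7:'h', 8:'i', 9:'j'}
--
--     result = ''
--     while age > 0 :
--         result += age_dict[age%10]
--         age //= 10
--
--     return result[::-1]
-- ===== SOURCE B (Python) =====
-- def solution(age):
--     return ''.join(chr(ord('a') + int(c)) for c in str(age)) if age > 0 else ''
-- ===== Notes on version B (the rewrite author's own statement) =====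
-- stated objective: idiomatic
-- what changed: B maps the characters of str(age) most-significant-first directly to letters via chr(ord('a')+int(c)) and joins them, replacing A's mod/floordiv digit-extraction loop with its dict lookups and final [::-1] reversal.
import Mathlib
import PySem

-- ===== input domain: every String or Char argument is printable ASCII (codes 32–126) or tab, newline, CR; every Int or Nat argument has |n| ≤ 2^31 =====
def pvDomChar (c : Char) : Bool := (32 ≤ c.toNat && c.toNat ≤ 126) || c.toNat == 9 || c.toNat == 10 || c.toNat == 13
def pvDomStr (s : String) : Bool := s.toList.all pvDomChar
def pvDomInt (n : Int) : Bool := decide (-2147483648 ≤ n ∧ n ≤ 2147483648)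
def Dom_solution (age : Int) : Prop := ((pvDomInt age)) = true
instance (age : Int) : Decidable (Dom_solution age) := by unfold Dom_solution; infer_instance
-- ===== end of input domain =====

-- B replaces A's mod/floordiv digit-extraction loop and final [::-1] reversal by mapping
-- the characters of str(age) most-significant-first to letters (idiomatic; same cost).

-- ===== PORT A =====
-- the dict literal age_dict (association list in insertion order)
def pvAgeDict : PySem.Dict Int Char :=
  PySem.Dict.mk [((0:Int),'a'),(1,'b'),(2,'c'),(3,'d'),(4,'e'),(5,'f'),(6,'g'),(7,'h'),(8,'i'),(9,'j')]


-- the 'while age > 0' loop; result is the accumulated string as a list of chars.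
-- age_dict[age%10] never misses for age > 0 (0 ≤ age%10 < 10), so .getD 'a' is never used.
def solutionGo (age : Int) (result : List Char) : List Char :=
  if _h : age > 0 then
    solutionGo (PySem.Int.floordiv age 10)
      (result ++ [(PySem.Dict.get? pvAgeDict (PySem.Int.mod age 10)).getD 'a'])
  else result
termination_by age.toNat
decreasing_by
  have h10 : PySem.Int.floordiv age 10 = age / 10 :=
    PySem.Int.floordiv_eq_ediv_of_pos (by omega)
  rw [h10]
  omega

-- result[::-1]: PySem.List.slice? … (-1) is some for step -1 (slice?_none_none_neg_one)
def solution (age : Int) : String :=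
  String.ofList ((PySem.List.slice? (solutionGo age []) none none (-1)).getD [])

-- ===== PORT B =====
-- chr(ord('a') + int(c)) for a digit character c
def pvLetter (c : Char) : Char := Char.ofNat (97 + (c.toNat - 48))

def solution_alt (age : Int) : String :=
  if age > 0 then String.ofList ((PySem.Int.toChars age).map pvLetter) else ""

-- ===== PRECONDITION & SPEC =====
def Spec_solution (age : Int) (out : String) : Prop := out = solution_alt age
instance (age : Int) (out : String) : Decidable (Spec_solution age out) := by unfold Spec_solution; infer_instance

-- ===== CLAIM (what is proved, stated in full; the proofs are below) =====
def Claim_equal_solution : Prop := ∀ (age : Int), Dom_solution age → Spec_solution age (solution age)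

-- ===== LEMMAS AND PROOFS =====

-- structural form of the decimal digit characters of m (most-significant first)
def pvDigs (m : Nat) : List Char :=
  if _h : m < 10 then [Nat.digitChar m]
  else pvDigs (m / 10) ++ [Nat.digitChar (m % 10)]
termination_by m
decreasing_by exact Nat.div_lt_self (by omega) (by omega)

theorem pvDigs_small (m : Nat) (h : m < 10) : pvDigs m = [Nat.digitChar m] := by
  conv_lhs => rw [pvDigs]
  rw [dif_pos h]

theorem pvDigs_big (m : Nat) (h : ¬ m < 10) :
    pvDigs m = pvDigs (m / 10) ++ [Nat.digitChar (m % 10)] := by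
  conv_lhs => rw [pvDigs]
  rw [dif_neg h]

theorem pvToDigitsCore_eq (f : Nat) : ∀ (m : Nat) (ds : List Char), m < f →
    Nat.toDigitsCore 10 f m ds = pvDigs m ++ ds := by
  induction f with
  | zero => intro m ds h; omega
  | succ f ih =>
    intro m ds h
    rw [Nat.toDigitsCore]
    by_cases h10 : m / 10 = 0
    · simp only [h10]
      rw [pvDigs_small m (by omega)]
      simp [Nat.mod_eq_of_lt (by omega : m < 10)]
    · simp only [h10]
      rw [ih (m / 10) _ (by omega)]
      rw [pvDigs_big m (by omega)]
      simp

theorem pvToChars_eq (m : Nat) : PySem.Int.toChars (m : Int) = pvDigs m := by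
  simp only [PySem.Int.toChars]
  rw [if_neg (by omega)]
  simp only [Int.toNat_natCast]
  rw [Nat.toDigits, pvToDigitsCore_eq (m + 1) m [] (by omega)]
  simp

-- the dict lookup on a digit d agrees with B's letter of the digit character
theorem pvDict_eq (d : Nat) (h : d < 10) :
    (PySem.Dict.get? pvAgeDict (d : Int)).getD 'a' = pvLetter (Nat.digitChar d) := by
  interval_cases d <;> decide

-- loop invariant: for positive m, the loop appends the letters least-significant first
theorem pvGo_eq (m : Nat) (hm : 0 < m) : ∀ (res : List Char),
    solutionGo (m : Int) res = res ++ ((pvDigs m).map pvLetter).reverse := by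
  induction m using Nat.strong_induction_on with
  | _ m ih =>
    intro res
    conv_lhs => rw [solutionGo]
    rw [dif_pos (by exact_mod_cast hm)]
    have hdiv : PySem.Int.floordiv (m : Int) 10 = ((m / 10 : Nat) : Int) :=
      PySem.Int.floordiv_natCast m 10
    have hmod : PySem.Int.mod (m : Int) 10 = ((m % 10 : Nat) : Int) :=
      PySem.Int.mod_natCast m 10
    rw [hdiv, hmod, pvDict_eq (m % 10) (by omega)]
    by_cases h10 : m < 10
    · have hz : m / 10 = 0 := by omega
      rw [hz]
      rw [solutionGo, dif_neg (by omega)]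
      rw [pvDigs_small m h10]
      simp [Nat.mod_eq_of_lt h10]
    · rw [ih (m / 10) (Nat.div_lt_self hm (by omega)) (by omega)]
      rw [pvDigs_big m h10]
      simp

-- ===== VERDICT (by name: the statement is the Claim_ definition above) =====
theorem solution_spec : Claim_equal_solution := by
  intro age _
  unfold Spec_solution solution solution_alt
  rw [PySem.List.slice?_none_none_neg_one]
  by_cases h : age > 0
  · rw [if_pos h]
    obtain ⟨m, rfl⟩ : ∃ m : Nat, age = (m : Int) := ⟨age.toNat, by omega⟩
    have hm : 0 < m := by exact_mod_cast h
    rw [pvGo_eq m hm []]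
    rw [pvToChars_eq m]
    simp
  · rw [if_neg h]
    conv_lhs => rw [solutionGo]
    rw [dif_neg h]
    rfl
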